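-- pv_equiv track=rewrite | github.com/susovonandremi/plot-it | backend/services/constraint_solver.py | _expand_rooms
-- ===== SOURCE A (Python) =====
-- from typing import List, Dict, Any, Optional, Tuple
--
-- def _normalize_type(rtype: str) -> str:
--     t = rtype.lower().strip().replace(' ', '_').replace('_room', '')
--     aliases = {
--         'bed_room': 'bedroom', 'bath_room': 'bathroom',
--         'living_room': 'living', 'dining_room': 'dining',
--         'wash_room': 'bathroom', 'wc': 'toilet',
--         'stairs': 'staircase', 'corridor': 'passage',
--         'hall': 'living', 'elevator': 'lift',
--         'porch': 'verandah', 'prayer': 'pooja', 'mandir': 'pooja',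
--     }
--     return aliases.get(t, t)
--
-- def _expand_rooms(rooms: List[Dict]) -> List[Dict]:
--     """Expand rooms with count > 1 into individual entries."""
--     expanded = []
--     for r in rooms:
--         count = int(r.get('count', 1) or 1)
--         for i in range(count):
--             entry = dict(r)
--             nt = _normalize_type(r.get('type', 'room'))
--             entry['normalized_type'] = nt
--             if 'id' not in entry or count > 1:
--                 entry['id'] = f"{nt}_{len(expanded)}"
--             entry.pop('count', None)
--             expanded.append(entry)
--     return expanded
-- ===== SOURCE B (Python) =====
-- def _normalize_type(rtype: str) -> str:
--     t = rtype.lower().strip().replace(' ', '_').replace('_room', '')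
--     aliases = {
--         'bed_room': 'bedroom', 'bath_room': 'bathroom',
--         'living_room': 'living', 'dining_room': 'dining',
--         'wash_room': 'bathroom', 'wc': 'toilet',
--         'stairs': 'staircase', 'corridor': 'passage',
--         'hall': 'living', 'elevator': 'lift',
--         'porch': 'verandah', 'prayer': 'pooja', 'mandir': 'pooja',
--     }
--     return aliases.get(t, t)
--
--
-- def _expand_rooms(rooms):
--     # pass 1: flatten rooms into one (template, normalized_type, needs_id) per copy
--     flat = []
--     for r in rooms:
--         count = int(r.get('count', 1) or 1)
--         nt = _normalize_type(r.get('type', 'room'))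
--         template = dict(r)
--         template['normalized_type'] = nt
--         flat.extend([(template, nt, 'id' not in r or count > 1)] * count)
--     # pass 2: the global enumeration index is the id number
--     out = []
--     for idx, (template, nt, needs_id) in enumerate(flat):
--         e = dict(template)
--         if needs_id:
--             e['id'] = f"{nt}_{idx}"
--         e.pop('count', None)
--         out.append(e)
--     return out
-- ===== Notes on version B (the rewrite author's own statement) =====
-- stated objective: alternative
-- what changed: B is a staged two-pass pipeline: pass 1 flattens rooms into one (template, normalized_type, needs_id) tuple per copy with no id logic, pass 2 enumerates that flat list and derives each id from the global enumeration index, replacing A's nested loops whose id comes from the inline len(expanded).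
import Mathlib
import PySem

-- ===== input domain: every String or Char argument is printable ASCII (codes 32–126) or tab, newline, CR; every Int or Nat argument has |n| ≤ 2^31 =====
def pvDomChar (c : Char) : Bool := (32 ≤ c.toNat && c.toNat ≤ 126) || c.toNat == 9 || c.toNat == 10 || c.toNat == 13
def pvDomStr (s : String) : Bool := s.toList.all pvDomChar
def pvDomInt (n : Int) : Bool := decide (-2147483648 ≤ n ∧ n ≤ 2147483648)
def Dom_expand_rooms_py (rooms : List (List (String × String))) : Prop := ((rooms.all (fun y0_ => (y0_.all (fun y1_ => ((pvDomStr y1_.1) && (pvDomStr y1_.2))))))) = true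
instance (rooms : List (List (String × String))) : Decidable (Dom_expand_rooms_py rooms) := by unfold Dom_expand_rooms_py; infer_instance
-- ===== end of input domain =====

-- B restructures A's nested loops into a staged two-pass pipeline (flatten, then enumerate
-- and assign ids from the global index); return values proved equal.

-- shared helper: literal port of the module helper _normalize_type (used by both Pythons)
def normalize_type_py (rtype : String) : String :=
  let t := PySem.Str.replace (PySem.Str.replace (PySem.Str.strip (PySem.Str.lower rtype)) " " "_") "_room" ""
  (PySem.Dict.ofList [("bed_room", "bedroom"), ("bath_room", "bathroom"),
    ("living_room", "living"), ("dining_room", "dining"),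
    ("wash_room", "bathroom"), ("wc", "toilet"),
    ("stairs", "staircase"), ("corridor", "passage"),
    ("hall", "living"), ("elevator", "lift"),
    ("porch", "verandah"), ("prayer", "pooja"), ("mandir", "pooja")]).getD t t

-- shared helper: int(r.get('count', 1) or 1) — both Pythons contain this exact expression.
-- (ofStr? = none is Python's ValueError; excluded by Pre_, the 0 default is never the claimed value there)
def py_count (d : PySem.Dict String String) : Int :=
  match d.get? "count" with
  | none => 1
  | some s => if s = "" then 1 else (PySem.Int.ofStr? s).getD 0

-- ===== PORT A =====
def expand_rooms_py (rooms : List (List (String × String))) : List (List (String × String)) :=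
  rooms.foldl (fun expanded r =>
    let d := PySem.Dict.ofList r
    let count := py_count d
    (PySem.List.pyRange 0 count 1).foldl (fun expanded _i =>
      let entry := PySem.Dict.ofList r
      let nt := normalize_type_py (d.getD "type" "room")
      let entry := entry.insert "normalized_type" nt
      let entry := if !entry.contains "id" || count > 1
        then entry.insert "id" (nt ++ "_" ++ PySem.Int.toStr (expanded.length : Int))
        else entry
      let entry := entry.erase "count"
      expanded ++ [entry.items]) expanded) []

-- ===== PORT B =====
-- pass 1 ('flat.extend([t] * count)': List.replicate count.toNat is exactly Python's
-- list * count, empty for count ≤ 0); pass 2 enumerates flat.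
def expand_rooms_py_alt (rooms : List (List (String × String))) : List (List (String × String)) :=
  let flat := rooms.foldl (fun acc r =>
    let d := PySem.Dict.ofList r
    let count := py_count d
    let nt := normalize_type_py (d.getD "type" "room")
    let template := d.insert "normalized_type" nt
    acc ++ List.replicate count.toNat (template, nt, !d.contains "id" || count > 1)) []
  (PySem.List.enumerate flat 0).foldl (fun out p =>
    let e := if p.2.2.2 then p.2.1.insert "id" (p.2.2.1 ++ "_" ++ PySem.Int.toStr p.1) else p.2.1
    out ++ [(e.erase "count").items]) []

-- ===== PRECONDITION & SPEC =====
-- Pre_ excludes exactly the inputs on which A raises ValueError: a room whose 'count'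
-- value is a nonempty string that int() rejects.
def Pre_expand_rooms_py (rooms : List (List (String × String))) : Prop :=
  (rooms.all (fun r =>
    ((PySem.Dict.ofList r).get? "count").all
      (fun s => s == "" || (PySem.Int.ofStr? s).isSome))) = true
instance (rooms : List (List (String × String))) : Decidable (Pre_expand_rooms_py rooms) := by
  unfold Pre_expand_rooms_py; infer_instance

def pvWitness_expand_rooms_py : (List (List (String × String))) :=
  [[("type", "Bed Room"), ("count", "2")], [("type", "wc"), ("id", "w")]]

def Spec_expand_rooms_py (rooms : List (List (String × String))) (out : List (List (String × String))) : Prop := out = expand_rooms_py_alt rooms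
instance (rooms : List (List (String × String))) (out : List (List (String × String))) : Decidable (Spec_expand_rooms_py rooms out) := by unfold Spec_expand_rooms_py; infer_instance

-- ===== CLAIM (what is proved, stated in full; the proofs are below) =====
def Claim_equal_expand_rooms_py : Prop := ∀ (rooms : List (List (String × String))), Dom_expand_rooms_py rooms → Pre_expand_rooms_py rooms → Spec_expand_rooms_py rooms (expand_rooms_py rooms)

-- ===== LEMMAS AND PROOFS =====

-- B's per-copy finalizer (pass 2 body) as a named function
def pvFin (p : Int × (PySem.Dict String String × String × Bool)) : List (String × String) :=
  ((if p.2.2.2 then p.2.1.insert "id" (p.2.2.1 ++ "_" ++ PySem.Int.toStr p.1) else p.2.1).erase "count").items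

-- B's per-room flat segment
def pvSeg (r : List (String × String)) : List (PySem.Dict String String × String × Bool) :=
  let d := PySem.Dict.ofList r
  let count := py_count d
  let nt := normalize_type_py (d.getD "type" "room")
  List.replicate count.toNat ((d.insert "normalized_type" nt), nt, !d.contains "id" || count > 1)

-- A's inner loop (append one entry built from the current length) equals a batch map
lemma inner_loop {α : Type} (F : Int → α) :
    ∀ (n : Nat) (a b : Int), (b - a).toNat = n → ∀ (exp : List α),
    (PySem.List.pyRange a b 1).foldl (fun e (_ : Int) => e ++ [F ((e.length : Int))]) exp
      = exp ++ (PySem.List.pyRange a b 1).map (fun j => F ((exp.length : Int) + (j - a))) := by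
  intro n
  induction n with
  | zero =>
    intro a b hn exp
    have hab : ¬ a < b := by omega
    simp [PySem.List.pyRange, hab]
  | succ m ih =>
    intro a b hn exp
    have hab : a < b := by omega
    rw [PySem.List.pyRange_one_cons hab]
    simp only [List.foldl_cons, List.map_cons, sub_self, add_zero]
    rw [ih (a+1) b (by omega)]
    rw [List.append_assoc, List.singleton_append]
    have h1 : (fun j => F ((((exp ++ [F ((exp.length : Int))]).length : Int)) + (j - (a+1))))
        = (fun j => F ((exp.length : Int) + (j - a))) := by
      funext j
      congr 1
      push_cast [List.length_append, List.length_cons, List.length_nil]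
      omega
    rw [h1]

-- instantiation of inner_loop at A's inner body
lemma inner_loopA (entry : PySem.Dict String String) (nt : String) (c : Bool)
    (n : Nat) (a b : Int) (h : (b - a).toNat = n) (exp : List (List (String × String))) :
    (PySem.List.pyRange a b 1).foldl (fun e (_ : Int) =>
        e ++ [((if c then entry.insert "id" (nt ++ "_" ++ PySem.Int.toStr ((e.length : Int)))
                else entry).erase "count").items]) exp
      = exp ++ (PySem.List.pyRange a b 1).map (fun j =>
          ((if c then entry.insert "id" (nt ++ "_" ++ PySem.Int.toStr ((exp.length : Int) + (j - a)))
            else entry).erase "count").items) :=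
  inner_loop (fun j => ((if c then entry.insert "id" (nt ++ "_" ++ PySem.Int.toStr j)
    else entry).erase "count").items) n a b h exp

-- mapping pvFin over an enumerated replicate = mapping an index-shifted body over pyRange
lemma enum_replicate_map (T : PySem.Dict String String × String × Bool) :
    ∀ (n : Nat) (s : Int),
    (PySem.List.enumerate (List.replicate n T) s).map pvFin
      = (PySem.List.pyRange 0 (n : Int) 1).map (fun j => pvFin (s + j, T)) := by
  intro n
  induction n with
  | zero => intro s; simp [PySem.List.enumerate_nil, PySem.List.pyRange]
  | succ m ih =>
    intro s
    have hc : ((m + 1 : Nat) : Int) = (m : Int) + 1 := by push_cast; ring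
    rw [List.replicate_succ, PySem.List.enumerate_cons, List.map_cons, hc,
      PySem.List.pyRange_one_cons (by omega), List.map_cons]
    have h0 : PySem.List.pyRange (0 + 1) ((m : Int) + 1) 1
        = (PySem.List.pyRange 0 (m : Int) 1).map (fun j => j + 1) := by
      rw [PySem.List.pyRange_one, PySem.List.pyRange_one, List.map_map]
      have h2 : ((m : Int) + 1 - (0 + 1)).toNat = ((m : Int) - 0).toNat := by omega
      rw [h2]
      refine List.map_congr_left (fun k _ => ?_)
      simp only [Function.comp_apply]
      omega
    rw [h0, List.map_map, ih (s + 1)]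
    refine congrArg₂ List.cons (by rw [add_zero]) ?_
    refine List.map_congr_left (fun j _ => ?_)
    simp only [Function.comp_apply]
    have hsj : s + 1 + j = s + (j + 1) := by ring
    rw [hsj]

-- pyRange over an Int count = pyRange over its toNat (both empty for count <= 0)
lemma pyRange_toNat (count : Int) :
    PySem.List.pyRange 0 count 1 = PySem.List.pyRange 0 ((count.toNat : Int)) 1 := by
  by_cases h : 0 < count
  · congr 1; omega
  · rw [PySem.List.pyRange_one_eq_nil (by omega), PySem.List.pyRange_one_eq_nil (by omega)]

-- the mapped batch of A's inner loop = pvFin mapped over an enumerated replicate segment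
lemma hmap_gen (d : PySem.Dict String String) (nt : String) (cnt : Int) (s : Int) :
    List.map (fun j =>
        ((if (!(d.insert "normalized_type" nt).contains "id" || decide (cnt > 1)) = true then
            (d.insert "normalized_type" nt).insert "id" (nt ++ "_" ++ PySem.Int.toStr (s + (j - 0)))
          else d.insert "normalized_type" nt).erase "count").items)
        (PySem.List.pyRange 0 cnt 1)
      = (PySem.List.enumerate
          (List.replicate cnt.toNat ((d.insert "normalized_type" nt), nt,
            !d.contains "id" || decide (cnt > 1))) s).map pvFin := by
  rw [enum_replicate_map, ← pyRange_toNat cnt]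
  refine List.map_congr_left (fun j _ => ?_)
  rw [PySem.Dict.contains_insert, sub_zero]
  rfl

-- A's result from any accumulator = accumulator ++ pvFin-mapped enumeration of B's flat list
lemma main_loop : ∀ (rooms : List (List (String × String)))
    (exp : List (List (String × String))),
    rooms.foldl (fun expanded r =>
      let d := PySem.Dict.ofList r
      let count := py_count d
      (PySem.List.pyRange 0 count 1).foldl (fun expanded _i =>
        let entry := PySem.Dict.ofList r
        let nt := normalize_type_py (d.getD "type" "room")
        let entry := entry.insert "normalized_type" nt
        let entry := if !entry.contains "id" || count > 1
          then entry.insert "id" (nt ++ "_" ++ PySem.Int.toStr (expanded.length : Int))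
          else entry
        let entry := entry.erase "count"
        expanded ++ [entry.items]) expanded) exp
    = exp ++ (PySem.List.enumerate (rooms.flatMap pvSeg) ((exp.length : Int))).map pvFin := by
  intro rooms
  induction rooms with
  | nil => intro exp; simp [PySem.List.enumerate_nil]
  | cons r rooms ih =>
    intro exp
    simp only [List.foldl_cons, List.flatMap_cons]
    rw [PySem.List.enumerate_append, List.map_append, ← List.append_assoc]
    rw [inner_loopA (((PySem.Dict.ofList r).insert "normalized_type"
        (normalize_type_py ((PySem.Dict.ofList r).getD "type" "room"))))
      (normalize_type_py ((PySem.Dict.ofList r).getD "type" "room"))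
      _ _ 0 (py_count (PySem.Dict.ofList r)) rfl exp]
    simp only [pvSeg]
    rw [hmap_gen (PySem.Dict.ofList r)
      (normalize_type_py ((PySem.Dict.ofList r).getD "type" "room"))
      (py_count (PySem.Dict.ofList r)) ((exp.length : Int))]
    rw [ih (exp ++ (PySem.List.enumerate
      (List.replicate (py_count (PySem.Dict.ofList r)).toNat
        (((PySem.Dict.ofList r).insert "normalized_type"
            (normalize_type_py ((PySem.Dict.ofList r).getD "type" "room"))),
          normalize_type_py ((PySem.Dict.ofList r).getD "type" "room"),
          !(PySem.Dict.ofList r).contains "id" || decide (py_count (PySem.Dict.ofList r) > 1)))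
      ((exp.length : Int))).map pvFin)]
    congr 3
    push_cast [List.length_append, List.length_map, PySem.List.length_enumerate]
    ring

-- B's pass-2 fold from [] is a map (stated with B's exact let-shape so it rewrites directly)
lemma pass2_map (l : List (Int × (PySem.Dict String String × String × Bool)))
    (acc : List (List (String × String))) :
    l.foldl (fun out p =>
      let e := if p.2.2.2 then p.2.1.insert "id" (p.2.2.1 ++ "_" ++ PySem.Int.toStr p.1) else p.2.1
      out ++ [(e.erase "count").items]) acc = acc ++ l.map pvFin := by
  induction l generalizing acc with
  | nil => simp
  | cons x l ih => simp [ih, pvFin]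

-- B's pass-1 fold from [] is a flatMap (same let-shape as the port)
lemma pass1_flatMap (rooms : List (List (String × String))) :
    rooms.foldl (fun acc r =>
      let d := PySem.Dict.ofList r
      let count := py_count d
      let nt := normalize_type_py (d.getD "type" "room")
      let template := d.insert "normalized_type" nt
      acc ++ List.replicate count.toNat (template, nt, !d.contains "id" || count > 1)) []
    = rooms.flatMap pvSeg :=
  (PySem.List.foldl_append_eq_flatMap pvSeg rooms []).trans (List.nil_append _)

-- ===== VERDICT (by name: the statement is the Claim_ definition above) =====
theorem expand_rooms_py_spec : Claim_equal_expand_rooms_py := by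
  intro rooms _ _
  show expand_rooms_py rooms = expand_rooms_py_alt rooms
  unfold expand_rooms_py expand_rooms_py_alt
  rw [main_loop rooms [], pass1_flatMap, pass2_map]
  simp
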